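-- pv_equiv track=rewrite | github.com/sfmalloy/advent-of-code-2024 | solutions/d04.py | search_horiz
-- ===== SOURCE A (Python) =====
-- def search_horiz(lines: list[str]) -> int:
--     count = 0
--     for line in lines:
--         for j in range(len(line)-3):
--             if line[j] in 'XS':
--                 guess = line[j:j+4]
--                 if guess == 'XMAS' or guess == 'SAMX':
--                     count += 1
--     return count
-- ===== SOURCE B (Python) =====
-- def search_horiz(lines: list[str]) -> int:
--     return sum(line.count('XMAS') + line.count('SAMX') for line in lines)
-- ===== Notes on version B (the rewrite author's own statement) =====
-- stated objective: idiomatic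
-- what changed: Replaces A's per-position sliding-window slice comparison by two non-overlapping substring counts per line (str.count for 'XMAS' and 'SAMX'), which agree with the per-position count because neither pattern can overlap an occurrence of itself.
import Mathlib
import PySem

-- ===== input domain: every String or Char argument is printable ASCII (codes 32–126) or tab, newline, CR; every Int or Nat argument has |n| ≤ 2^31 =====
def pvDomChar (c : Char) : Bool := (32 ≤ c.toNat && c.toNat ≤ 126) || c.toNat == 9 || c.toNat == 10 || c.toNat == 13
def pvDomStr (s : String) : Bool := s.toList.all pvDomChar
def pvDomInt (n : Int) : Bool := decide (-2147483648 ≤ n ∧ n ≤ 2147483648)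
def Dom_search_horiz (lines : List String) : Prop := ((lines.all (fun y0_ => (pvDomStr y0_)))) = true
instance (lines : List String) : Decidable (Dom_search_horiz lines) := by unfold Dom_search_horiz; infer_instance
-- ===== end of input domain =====

-- B replaces A's per-position window scan by two non-overlapping str.count substring counts
-- per line; the counts agree because neither pattern can overlap itself (idiomatic; same cost).

-- ===== PORT A =====
def search_horiz (lines : List String) : Int :=
  lines.foldl (fun count line =>
    (PySem.List.pyRange 0 ((PySem.Str.len line) - 3) 1).foldl (fun count j =>
      match PySem.List.pyGet? line.toList j with
      | none => count  -- unreachable: j ∈ range(0, len-3) is always a valid index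
      | some c =>
        if PySem.Chars.isIn [c] "XS".toList then
          let guess := PySem.List.slice line.toList (some j) (some (j + 4))
          if guess = "XMAS".toList ∨ guess = "SAMX".toList then count + 1 else count
        else count) count) 0

-- ===== PORT B =====
-- sum(line.count('XMAS') + line.count('SAMX') for line in lines)
def search_horiz_alt (lines : List String) : Int :=
  lines.foldl (fun total line =>
    total + ((PySem.Str.count line "XMAS" : Nat) + (PySem.Str.count line "SAMX" : Nat) : Int)) 0

-- ===== PRECONDITION & SPEC =====
def Spec_search_horiz (lines : List String) (out : Int) : Prop := out = search_horiz_alt lines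
instance (lines : List String) (out : Int) : Decidable (Spec_search_horiz lines out) := by unfold Spec_search_horiz; infer_instance

-- ===== CLAIM (what is proved, stated in full; the proofs are below) =====
def Claim_equal_search_horiz : Prop := ∀ (lines : List String), Dom_search_horiz lines → Spec_search_horiz lines (search_horiz lines)

-- ===== LEMMAS AND PROOFS =====

-- position k (as a Nat) carries a hit (A's test)
def pvHit4 (cs : List Char) (k : Nat) : Bool :=
  decide ((cs.drop k).take 4 = "XMAS".toList ∨ (cs.drop k).take 4 = "SAMX".toList)

-- number of positions of cs at which p occurs (as a prefix of the drop)
def pvOcc (p cs : List Char) : Nat :=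
  (List.range cs.length).countP (fun j => p.isPrefixOf (cs.drop j))

-- the slice [j:j+4] at a nonnegative index is take 4 ∘ drop j
theorem pvSlice_natCast (cs : List Char) (n : Nat) :
    PySem.List.slice cs (some (n : Int)) (some ((n : Int) + 4)) = (cs.drop n).take 4 := by
  rw [PySem.List.slice_toNat cs (by positivity) (by positivity)]
  have h1 : ((n : Int)).toNat = n := by omega
  have h2 : ((n : Int) + 4).toNat = n + 4 := by omega
  rw [h1, h2]
  congr 1
  omega

def pvHitI (cs : List Char) (j : Int) : Bool :=
  decide (PySem.List.slice cs (some j) (some (j + 4)) = "XMAS".toList ∨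
          PySem.List.slice cs (some j) (some (j + 4)) = "SAMX".toList)

theorem pvHitI_natCast (cs : List Char) (k : Nat) : pvHitI cs (k : Int) = pvHit4 cs k := by
  unfold pvHitI pvHit4
  rw [pvSlice_natCast]

-- A's inner loop counts the hit positions
theorem pv_lineA (cs : List Char) (acc : Int) :
    (PySem.List.pyRange 0 ((cs.length : Int) - 3) 1).foldl (fun count j =>
      match PySem.List.pyGet? cs j with
      | none => count
      | some c =>
        if PySem.Chars.isIn [c] "XS".toList then
          let guess := PySem.List.slice cs (some j) (some (j + 4))
          if guess = "XMAS".toList ∨ guess = "SAMX".toList then count + 1 else count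
        else count) acc
    = acc + ((List.range (cs.length - 3)).countP (pvHit4 cs) : Int) := by
  have hstep : ∀ (acc : Int) (j : Int), j ∈ PySem.List.pyRange 0 ((cs.length : Int) - 3) 1 →
      (fun (count : Int) (j : Int) =>
        match PySem.List.pyGet? cs j with
        | none => count
        | some c =>
          if PySem.Chars.isIn [c] "XS".toList then
            let guess := PySem.List.slice cs (some j) (some (j + 4))
            if guess = "XMAS".toList ∨ guess = "SAMX".toList then count + 1 else count
          else count) acc j
      = (fun (count : Int) (j : Int) => if pvHitI cs j then count + 1 else count) acc j := by
    intro acc j hj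
    obtain ⟨hj0, hjlt⟩ := (PySem.List.mem_pyRange_one).mp hj
    obtain ⟨n, rfl⟩ : ∃ m : Nat, j = (m : Int) := ⟨j.toNat, (Int.toNat_of_nonneg hj0).symm⟩
    have hslice : PySem.List.slice cs (some (n : Int)) (some ((n : Int) + 4)) = (cs.drop n).take 4 :=
      pvSlice_natCast cs n
    by_cases hhit : (cs.drop n).take 4 = "XMAS".toList ∨ (cs.drop n).take 4 = "SAMX".toList
    · -- a hit: the first character is 'X' or 'S', so A's guard passes and A counts it
      obtain ⟨a, l, hd⟩ : ∃ a l, cs.drop n = a :: l := by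
        cases hd : cs.drop n with
        | nil => rw [hd, List.take_nil] at hhit; exact absurd hhit (by decide)
        | cons a l => exact ⟨a, l, rfl⟩
      have ha : a = 'X' ∨ a = 'S' := by
        rcases hhit with h | h
        · left
          rw [hd] at h
          have := congrArg List.head? h
          simpa using this
        · right
          rw [hd] at h
          have := congrArg List.head? h
          simpa using this
      have hget : cs[n]? = some a := by
        have h0 : (cs.drop n)[0]? = some a := by rw [hd]; rfl
        rw [List.getElem?_drop] at h0
        simpa using h0
      have hpg : PySem.List.pyGet? cs ((n : Nat) : Int) = some a := by
        rw [PySem.List.pyGet?_natCast, hget]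
      have hI : pvHitI cs (n : Int) = true := by
        unfold pvHitI; rw [hslice]; exact decide_eq_true hhit
      have hisin : PySem.Chars.isIn [a] "XS".toList = true := by
        rcases ha with rfl | rfl <;> decide
      simp only [hpg, hI, hisin, if_true, hslice, if_pos hhit]
    · have hI : pvHitI cs (n : Int) = false := by
        unfold pvHitI; rw [hslice]; exact decide_eq_false hhit
      cases hg : PySem.List.pyGet? cs ((n : Nat) : Int) with
      | none => simp [hg, hI]
      | some c =>
          push Not at hhit
          simp [hg, hI, hslice]
          intro _
          exact hhit
  refine (PySem.List.foldl_congr_mem _ _ _ _ hstep).trans ?_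
  rw [PySem.List.foldl_if_add_one, PySem.List.pyRange_one, List.countP_map]
  have hm : (((cs.length : Int) - 3) - 0).toNat = cs.length - 3 := by omega
  rw [hm]
  congr 2
  refine List.countP_congr ?_
  intro k _
  simp only [Function.comp_apply, zero_add]
  rw [pvHitI_natCast]

-- a 4-character pattern is a prefix iff the first 4 characters equal it
theorem pv_take4_prefix (p x : List Char) (hp : p.length = 4) :
    x.take 4 = p ↔ p.isPrefixOf x = true := by
  rw [List.isPrefixOf_iff_prefix]
  constructor
  · intro h; rw [← h]; exact List.take_prefix 4 x
  · rintro ⟨r, rfl⟩; rw [← hp, List.take_left]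

-- pvOcc satisfies the obvious head recursion
theorem pvOcc_cons (p : List Char) (h : Char) (t : List Char) :
    pvOcc p (h :: t) = (if p.isPrefixOf (h :: t) then 1 else 0) + pvOcc p t := by
  unfold pvOcc
  rw [List.length_cons, List.range_succ_eq_map, List.countP_cons, List.countP_map]
  rw [List.countP_congr (fun k _ => by rfl :
      ∀ k ∈ List.range t.length,
        (((fun j => p.isPrefixOf ((h :: t).drop j)) ∘ Nat.succ) k = true
          ↔ (fun j => p.isPrefixOf (t.drop j)) k = true))]
  simp only [List.drop_zero]
  by_cases hq : p.isPrefixOf (h :: t)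
  · simp only [hq, if_true]
    omega
  · have hq' : p.isPrefixOf (h :: t) = false := Bool.eq_false_iff.mpr hq
    simp only [hq', Bool.false_eq_true, if_false]
    omega

-- one unfolding step of count.go on a nonempty list
theorem pv_go_cons (p : List Char) (f : Nat) (h : Char) (t : List Char) (acc : Nat) :
    PySem.Chars.count.go p (f+1) (h::t) acc =
      if p.isPrefixOf (h::t) then PySem.Chars.count.go p f (List.drop p.length (h::t)) (acc+1)
      else PySem.Chars.count.go p f t acc := by
  rw [PySem.Chars.count.go]

-- count.go counts occurrences when the pattern cannot overlap itself
theorem pv_go_eq (p : List Char) (hp : p.length = 4)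
    (hno : ∀ l, p.isPrefixOf l = true →
      p.isPrefixOf (l.drop 1) = false ∧ p.isPrefixOf (l.drop 2) = false ∧ p.isPrefixOf (l.drop 3) = false) :
    ∀ (fuel : Nat) (l : List Char) (acc : Nat), l.length ≤ fuel →
      PySem.Chars.count.go p fuel l acc = acc + pvOcc p l := by
  intro fuel
  induction fuel with
  | zero =>
      intro l acc hl
      have : l = [] := List.eq_nil_of_length_eq_zero (Nat.le_zero.mp hl)
      subst this
      rw [PySem.Chars.count.go]
      simp [pvOcc]
  | succ f ih =>
      intro l acc hl
      cases l with
      | nil =>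
          rw [PySem.Chars.count.go]
          · simp [pvOcc]
          · omega
      | cons h t =>
          rw [pv_go_cons]
          by_cases hpre : p.isPrefixOf (h :: t)
          · simp only [hpre, if_true, hp]
            have hlen4 : 4 ≤ (h :: t).length := by
              obtain ⟨r, hr⟩ := List.isPrefixOf_iff_prefix.mp hpre
              rw [← hr]; simp [hp]
            obtain ⟨b, t1, hb⟩ : ∃ b t1, t = b :: t1 := by
              cases t with | nil => simp at hlen4 | cons b t1 => exact ⟨b, t1, rfl⟩
            obtain ⟨c, t2, hc⟩ : ∃ c t2, t1 = c :: t2 := by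
              subst hb; cases t1 with | nil => simp at hlen4 | cons c t2 => exact ⟨c, t2, rfl⟩
            obtain ⟨d, t3, hd⟩ : ∃ d t3, t2 = d :: t3 := by
              subst hb hc; cases t2 with | nil => simp at hlen4 | cons d t3 => exact ⟨d, t3, rfl⟩
            subst hb hc hd
            obtain ⟨h1, h2, h3⟩ := hno _ hpre
            simp only [List.drop_succ_cons, List.drop_zero] at h1 h2 h3 ⊢
            rw [ih _ _ (by simp at hl ⊢; omega)]
            rw [pvOcc_cons, pvOcc_cons, pvOcc_cons, pvOcc_cons]
            simp only [hpre, if_true]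
            rw [show p.isPrefixOf (b :: c :: d :: t3) = false from h1,
                show p.isPrefixOf (c :: d :: t3) = false from h2,
                show p.isPrefixOf (d :: t3) = false from h3]
            simp
            omega
          · have hpre' : p.isPrefixOf (h :: t) = false := Bool.eq_false_iff.mpr hpre
            rw [if_neg (by simp [hpre']), ih t acc (by simp at hl ⊢; omega), pvOcc_cons, hpre']
            simp
  
-- the two concrete patterns cannot overlap themselves
theorem pv_no_overlap_XMAS : ∀ l, ("XMAS".toList).isPrefixOf l = true →
    ("XMAS".toList).isPrefixOf (l.drop 1) = false ∧ ("XMAS".toList).isPrefixOf (l.drop 2) = false ∧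
    ("XMAS".toList).isPrefixOf (l.drop 3) = false := by
  intro l hpre
  obtain ⟨r, hr⟩ := List.isPrefixOf_iff_prefix.mp hpre
  obtain ⟨r, rfl⟩ := hr
  refine ⟨?_, ?_, ?_⟩ <;> cases r <;> simp [List.isPrefixOf]

theorem pv_no_overlap_SAMX : ∀ l, ("SAMX".toList).isPrefixOf l = true →
    ("SAMX".toList).isPrefixOf (l.drop 1) = false ∧ ("SAMX".toList).isPrefixOf (l.drop 2) = false ∧
    ("SAMX".toList).isPrefixOf (l.drop 3) = false := by
  intro l hpre
  obtain ⟨r, hr⟩ := List.isPrefixOf_iff_prefix.mp hpre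
  obtain ⟨r, rfl⟩ := hr
  refine ⟨?_, ?_, ?_⟩ <;> cases r <;> simp [List.isPrefixOf]

-- str.count of either pattern is its occurrence count
theorem pv_count_XMAS (cs : List Char) : PySem.Chars.count cs "XMAS".toList = pvOcc "XMAS".toList cs := by
  unfold PySem.Chars.count
  rw [if_neg (by decide)]
  rw [pv_go_eq _ (by decide) pv_no_overlap_XMAS _ _ _ (le_refl _)]
  exact Nat.zero_add _

theorem pv_count_SAMX (cs : List Char) : PySem.Chars.count cs "SAMX".toList = pvOcc "SAMX".toList cs := by
  unfold PySem.Chars.count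
  rw [if_neg (by decide)]
  rw [pv_go_eq _ (by decide) pv_no_overlap_SAMX _ _ _ (le_refl _)]
  exact Nat.zero_add _

-- a disjoint-or split of countP
theorem pv_countP_or {α : Type} (l : List α) (p q : α → Bool)
    (h : ∀ x ∈ l, ¬(p x = true ∧ q x = true)) :
    l.countP (fun x => p x || q x) = l.countP p + l.countP q := by
  induction l with
  | nil => simp
  | cons a t ih =>
      rw [List.countP_cons, List.countP_cons, List.countP_cons,
          ih (fun x hx => h x (List.mem_cons_of_mem a hx))]
      have := h a (List.mem_cons_self)
      by_cases hpa : p a <;> by_cases hqa : q a <;> simp_all <;> omega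

-- a range-countP is unchanged by truncating a tail on which the predicate is false
theorem pv_countP_range_drop (p : Nat → Bool) (m n : Nat) (hmn : m ≤ n)
    (h : ∀ j, m ≤ j → p j = false) :
    (List.range n).countP p = (List.range m).countP p := by
  rw [show n = m + (n - m) from by omega, List.range_add, List.countP_append]
  have h0 : ((List.range (n - m)).map (fun k => m + k)).countP p = 0 := by
    rw [List.countP_eq_zero]
    intro j hj
    simp only [List.mem_map] at hj
    obtain ⟨k, _, rfl⟩ := hj
    simp [h _ (Nat.le_add_right m k)]
  omega

-- A's per-line hit count is the sum of the two occurrence counts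
theorem pv_hits_eq_occ (cs : List Char) :
    (List.range (cs.length - 3)).countP (pvHit4 cs)
    = pvOcc "XMAS".toList cs + pvOcc "SAMX".toList cs := by
  have hhit : ∀ k, pvHit4 cs k
      = (("XMAS".toList).isPrefixOf (cs.drop k) || ("SAMX".toList).isPrefixOf (cs.drop k)) := by
    intro k
    unfold pvHit4
    rw [Bool.eq_iff_iff, decide_eq_true_iff, Bool.or_eq_true]
    rw [pv_take4_prefix _ _ (by decide), pv_take4_prefix _ _ (by decide)]
  -- extend the range from len-3 to len: the extra positions carry no 4-character prefix
  have hfar : ∀ j, cs.length - 3 ≤ j →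
      ("XMAS".toList).isPrefixOf (cs.drop j) = false ∧ ("SAMX".toList).isPrefixOf (cs.drop j) = false := by
    intro j hj
    constructor <;>
    · rw [← Bool.not_eq_true, List.isPrefixOf_iff_prefix]
      intro hpfx
      have := hpfx.length_le
      simp at this
      omega
  have hrange : (List.range cs.length).countP (pvHit4 cs)
      = (List.range (cs.length - 3)).countP (pvHit4 cs) := by
    refine pv_countP_range_drop _ _ _ (by omega) ?_
    intro j hj
    rw [hhit j, (hfar j hj).1, (hfar j hj).2]
    simp
  rw [← hrange, List.countP_congr (fun k _ => by rw [hhit k]),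
      pv_countP_or _ _ _ ?_]
  · rfl
  · intro j _
    rintro ⟨hX, hS⟩
    obtain ⟨rX, hrX⟩ := List.isPrefixOf_iff_prefix.mp hX
    obtain ⟨rS, hrS⟩ := List.isPrefixOf_iff_prefix.mp hS
    have hx : (cs.drop j).head? = some 'X' := by rw [← hrX]; rfl
    have hs : (cs.drop j).head? = some 'S' := by rw [← hrS]; rfl
    rw [hx] at hs
    simp at hs

-- ===== VERDICT (by name: the statement is the Claim_ definition above) =====
theorem search_horiz_spec : Claim_equal_search_horiz := by
  intro lines hdom
  unfold Spec_search_horiz search_horiz search_horiz_alt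
  clear hdom
  induction lines using List.reverseRecOn with
  | nil => rfl
  | append_singleton xs x ih =>
      simp only [List.foldl_append, List.foldl_cons, List.foldl_nil]
      rw [ih]
      have hA := pv_lineA x.toList
      simp only [PySem.Str.len_eq] at *
      rw [hA, pv_hits_eq_occ]
      rw [PySem.Str.count_eq, PySem.Str.count_eq, pv_count_XMAS, pv_count_SAMX]
      push_cast
      ring
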